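-- pv_equiv track=rewrite | github.com/projeto-de-algoritmos-2026/G4_Grafos_PA-26.1 | voo-dijkstra/bfs.py | _find_top_k_by_connections
-- ===== SOURCE A (Python) =====
-- import heapq
--
-- def _find_top_k_by_connections(
-- 	graph: dict[str, set[str]],
-- 	origin: str,
-- 	destination: str,
-- 	k: int,
-- 	max_connections: int,
-- 	max_expansions: int,
-- ) -> tuple[list[tuple[str, ...]], int, bool]:
-- 	# Enumeracao por prioridade em conexoes com caminho simples e limites de seguranca.
-- 	if origin == destination:
-- 		return [(origin,)], 0, False
--
-- 	ordered_graph: dict[str, tuple[str, ...]] = {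
-- 		node: tuple(sorted(neighbors)) for node, neighbors in graph.items()
-- 	}
-- 	pq: list[tuple[int, tuple[str, ...]]] = [(0, (origin,))]
-- 	found: list[tuple[str, ...]] = []
-- 	expansions = 0
-- 	truncated = False
--
-- 	while pq and len(found) < k:
-- 		connections, path = heapq.heappop(pq)
-- 		current = path[-1]
--
-- 		if current == destination:
-- 			found.append(path)
-- 			continue
--
-- 		if connections >= max_connections:
-- 			continue
--
-- 		for neighbor in ordered_graph.get(current, ()):
-- 			if neighbor in path:
-- 				continue
-- 			expansions += 1
-- 			if expansions > max_expansions: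
-- 				truncated = True
-- 				pq = []
-- 				break
-- 			heapq.heappush(pq, (connections + 1, path + (neighbor,)))
--
-- 	return found, expansions, truncated
-- ===== SOURCE B (Python) =====
-- def _find_top_k_by_connections(
-- 	graph: dict[str, set[str]],
-- 	origin: str,
-- 	destination: str,
-- 	k: int,
-- 	max_connections: int,
-- 	max_expansions: int,
-- ) -> tuple[list[tuple[str, ...]], int, bool]:
-- 	# Level-synchronous BFS over frontiers of simple paths, one connection count at a time.
-- 	if origin == destination:
-- 		return [(origin,)], 0, False
--
-- 	adjacency = {node: sorted(neighbors) for node, neighbors in graph.items()}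
-- 	found: list[tuple[str, ...]] = []
-- 	expansions = 0
-- 	truncated = False
-- 	frontier: list[tuple[str, ...]] = [(origin,)]
-- 	connections = 0
--
-- 	while frontier and len(found) < k and not truncated:
-- 		next_frontier: list[tuple[str, ...]] = []
-- 		for path in frontier:
-- 			if len(found) >= k:
-- 				break
-- 			if path[-1] == destination:
-- 				found.append(path)
-- 			elif connections < max_connections:
-- 				for neighbor in adjacency.get(path[-1], []):
-- 					if neighbor not in path:
-- 						expansions += 1
-- 						if expansions > max_expansions:
-- 							truncated = True
-- 							break
-- 						next_frontier.append(path + (neighbor,))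
-- 				if truncated:
-- 					break
-- 		frontier = next_frontier
-- 		connections += 1
--
-- 	return found, expansions, truncated
-- ===== Notes on version B (the rewrite author's own statement) =====
-- stated objective: alternative
-- what changed: The best-first priority queue (heapq of (connections, path) tuples) is replaced by a level-synchronous BFS that processes one whole connection level at a time: a frontier list of simple paths per level, expanded in order into the next frontier; this is exact because children of lexicographically ordered parents with sorted neighbor lists are generated already in heap pop order.
import Mathlib
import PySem

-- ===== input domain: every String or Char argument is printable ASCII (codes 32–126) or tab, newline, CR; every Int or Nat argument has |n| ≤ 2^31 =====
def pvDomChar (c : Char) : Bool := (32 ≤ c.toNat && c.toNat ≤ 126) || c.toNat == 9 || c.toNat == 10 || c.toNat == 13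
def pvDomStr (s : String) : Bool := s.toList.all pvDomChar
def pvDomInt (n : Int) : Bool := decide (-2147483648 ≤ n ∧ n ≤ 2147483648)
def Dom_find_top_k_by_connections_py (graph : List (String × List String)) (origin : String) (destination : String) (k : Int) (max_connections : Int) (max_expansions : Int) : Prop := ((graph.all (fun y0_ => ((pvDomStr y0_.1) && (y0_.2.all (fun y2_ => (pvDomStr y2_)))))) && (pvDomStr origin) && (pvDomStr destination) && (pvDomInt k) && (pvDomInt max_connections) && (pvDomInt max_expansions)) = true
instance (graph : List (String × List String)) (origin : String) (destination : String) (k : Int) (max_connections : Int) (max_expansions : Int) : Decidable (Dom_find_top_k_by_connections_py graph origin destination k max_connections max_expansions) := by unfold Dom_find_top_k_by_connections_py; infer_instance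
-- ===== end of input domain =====

-- B replaces A's best-first priority queue (heapq of (connections, path) entries) by a
-- level-synchronous BFS over per-level frontier lists; same return value, no heap maintenance.

-- ===== PORT A =====

-- Python comparison `p < q` on tuples of strings (lexicographic, shorter prefix first).
def pvPathLt : List String → List String → Bool
  | [], [] => false
  | [], _ :: _ => true
  | _ :: _, [] => false
  | a :: as, b :: bs => if a < b then true else if b < a then false else pvPathLt as bs

-- Python comparison on heap entries `(connections, path)` (tuple order).
def pvEntryLt (x y : Int × List String) : Bool :=
  decide (x.1 < y.1) || (decide (x.1 = y.1) && pvPathLt x.2 y.2)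

-- heapq modelled as a list kept in ascending order: heappush = ordered insert, heappop =
-- take the head.  Exact for this program: heapq always pops a minimal entry, and all
-- entries ever queued together are pairwise distinct under Pre_ (duplicate-free
-- neighbor sets), so the popped entry is the unique minimum.
def pvHpush (pq : List (Int × List String)) (e : Int × List String) : List (Int × List String) :=
  match pq with
  | [] => [e]
  | x :: rest => if pvEntryLt e x then e :: x :: rest else x :: pvHpush rest e

-- ordered_graph = {node: tuple(sorted(neighbors)) for node, neighbors in graph.items()}
def pvOrderedGraph (graph : List (String × List String)) : PySem.Dict String (List String) :=
  graph.foldl (fun d p => d.insert p.1 (PySem.List.sorted p.2 (fun x => x) false)) PySem.Dict.empty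

-- A's inner `for neighbor in ordered_graph.get(current, ())` loop
-- (on truncation A sets pq = [] and breaks; we return the emptied queue with the flag).
def pvExpandA (c : Int) (path : List String) (maxe : Int) :
    List String → List (Int × List String) → Int → List (Int × List String) × Int × Bool
  | [], pq, exp => (pq, exp, false)
  | nb :: rest, pq, exp =>
    if path.contains nb then pvExpandA c path maxe rest pq exp
    else if maxe < exp + 1 then ([], exp + 1, true)
    else pvExpandA c path maxe rest (pvHpush pq (c + 1, path ++ [nb])) (exp + 1)

-- the `while pq and len(found) < k` loop of A; the fuel argument only makes the
-- recursion structural: it starts at an upper bound on the number of iterations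
-- (the loop pops one entry per iteration and pushes at most max_expansions entries
-- in total), so the fuel-0 case is never reached.
def pvLoopA (dest : String) (k maxc maxe : Int) (adj : PySem.Dict String (List String)) :
    Nat → List (Int × List String) → List (List String) → Int →
    List (List String) × Int × Bool
  | 0, _, found, exp => (found, exp, false)
  | _ + 1, [], found, exp => (found, exp, false)
  | fuel + 1, (c, path) :: rest, found, exp =>
    if (found.length : Int) < k then
      -- current = path[-1]; queued paths are always nonempty, so the default is never used
      if (PySem.List.pyGet? path (-1)).getD "" == dest then
        pvLoopA dest k maxc maxe adj fuel rest (found ++ [path]) exp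
      else if maxc ≤ c then
        pvLoopA dest k maxc maxe adj fuel rest found exp
      else
        let r := pvExpandA c path maxe (adj.getD ((PySem.List.pyGet? path (-1)).getD "") []) rest exp
        if r.2.2 then (found, r.2.1, true)
        else pvLoopA dest k maxc maxe adj fuel r.1 found r.2.1
    else (found, exp, false)

def find_top_k_by_connections_py (graph : List (String × List String)) (origin : String) (destination : String) (k : Int) (max_connections : Int) (max_expansions : Int) : List (List String) × Int × Bool :=
  if origin == destination then ([[origin]], 0, false)
  else
    pvLoopA destination k max_connections max_expansions (pvOrderedGraph graph)
      (2 * (max_expansions + 1).toNat + 2) [(0, [origin])] [] 0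

-- ===== PORT B =====

-- B's inner `for neighbor in adjacency.get(path[-1], [])` loop: append new simple
-- extensions of `path` to the next frontier, counting expansions.
def pvExpandB (path : List String) (maxe : Int) :
    List String → List (List String) → Int → List (List String) × Int × Bool
  | [], nxt, exp => (nxt, exp, false)
  | nb :: rest, nxt, exp =>
    if !path.contains nb then
      if maxe < exp + 1 then (nxt, exp + 1, true)
      else pvExpandB path maxe rest (nxt ++ [path ++ [nb]]) (exp + 1)
    else pvExpandB path maxe rest nxt exp

-- B's `for path in frontier` loop: one whole connection level; returns
-- (found, next_frontier, expansions, truncated).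
def pvLevel (dest : String) (k maxc maxe : Int) (adj : PySem.Dict String (List String)) (c : Int) :
    List (List String) → List (List String) → List (List String) → Int →
    List (List String) × List (List String) × Int × Bool
  | [], nxt, found, exp => (found, nxt, exp, false)
  | path :: rest, nxt, found, exp =>
    if k ≤ (found.length : Int) then (found, nxt, exp, false)
    else if (PySem.List.pyGet? path (-1)).getD "" == dest then
      pvLevel dest k maxc maxe adj c rest nxt (found ++ [path]) exp
    else if c < maxc then
      let r := pvExpandB path maxe (adj.getD ((PySem.List.pyGet? path (-1)).getD "") []) nxt exp
      if r.2.2 then (found, r.1, r.2.1, true)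
      else pvLevel dest k maxc maxe adj c rest r.1 found r.2.1
    else pvLevel dest k maxc maxe adj c rest nxt found exp

-- B's outer `while frontier and len(found) < k and not truncated` loop; as in port A,
-- the fuel only makes the recursion structural and starts at an upper bound on the
-- number of levels, so the fuel-0 case is never reached.
def pvLoopB (dest : String) (k maxc maxe : Int) (adj : PySem.Dict String (List String)) :
    Nat → Int → List (List String) → List (List String) → Int →
    List (List String) × Int × Bool
  | 0, _, _, found, exp => (found, exp, false)
  | _ + 1, _, [], found, exp => (found, exp, false)
  | fuel + 1, c, f :: fs, found, exp =>
    if (found.length : Int) < k then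
      let r := pvLevel dest k maxc maxe adj c (f :: fs) [] found exp
      if r.2.2.2 then (r.1, r.2.2.1, true)
      else pvLoopB dest k maxc maxe adj fuel (c + 1) r.2.1 r.1 r.2.2.1
    else (found, exp, false)

def find_top_k_by_connections_py_alt (graph : List (String × List String)) (origin : String) (destination : String) (k : Int) (max_connections : Int) (max_expansions : Int) : List (List String) × Int × Bool :=
  if origin == destination then ([[origin]], 0, false)
  else
    pvLoopB destination k max_connections max_expansions (pvOrderedGraph graph)
      (2 * (max_expansions + 1).toNat + 4) 0 [[origin]] [] 0

-- ===== PRECONDITION & SPEC =====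

-- graph is a Python dict[str, set[str]]: each value encodes a SET, i.e. a list of
-- DISTINCT strings (the type convention); Pre_ states exactly that set invariant.
def Pre_find_top_k_by_connections_py (graph : List (String × List String)) (origin : String) (destination : String) (k : Int) (max_connections : Int) (max_expansions : Int) : Prop :=
  ∀ p ∈ graph, p.2.Nodup
instance (graph : List (String × List String)) (origin : String) (destination : String) (k : Int) (max_connections : Int) (max_expansions : Int) : Decidable (Pre_find_top_k_by_connections_py graph origin destination k max_connections max_expansions) := by unfold Pre_find_top_k_by_connections_py; infer_instance

def pvWitness_find_top_k_by_connections_py : (List (String × List String)) × String × String × Int × Int × Int :=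
  ([("a", ["b", "c"]), ("b", ["c"]), ("c", [])], "a", "c", 2, 3, 10)

def Spec_find_top_k_by_connections_py (graph : List (String × List String)) (origin : String) (destination : String) (k : Int) (max_connections : Int) (max_expansions : Int) (out : List (List String) × Int × Bool) : Prop := out = find_top_k_by_connections_py_alt graph origin destination k max_connections max_expansions
instance (graph : List (String × List String)) (origin : String) (destination : String) (k : Int) (max_connections : Int) (max_expansions : Int) (out : List (List String) × Int × Bool) : Decidable (Spec_find_top_k_by_connections_py graph origin destination k max_connections max_expansions out) := by unfold Spec_find_top_k_by_connections_py; infer_instance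

-- ===== CLAIM (what is proved, stated in full; the proofs are below) =====
def Claim_equal_find_top_k_by_connections_py : Prop := ∀ (graph : List (String × List String)) (origin : String) (destination : String) (k : Int) (max_connections : Int) (max_expansions : Int), Dom_find_top_k_by_connections_py graph origin destination k max_connections max_expansions → Pre_find_top_k_by_connections_py graph origin destination k max_connections max_expansions → Spec_find_top_k_by_connections_py graph origin destination k max_connections max_expansions (find_top_k_by_connections_py graph origin destination k max_connections max_expansions)

-- ===== LEMMAS AND PROOFS =====

theorem pvPathLt_asymm : ∀ p q, pvPathLt p q = true → pvPathLt q p = false := by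
  intro p
  induction p with
  | nil =>
    intro q h
    cases q with
    | nil => simp [pvPathLt] at h
    | cons b bs => simp [pvPathLt]
  | cons a as ih =>
    intro q h
    cases q with
    | nil => simp [pvPathLt] at h
    | cons b bs =>
      simp only [pvPathLt] at h ⊢
      by_cases h1 : a < b
      · rw [if_neg (lt_asymm h1), if_pos h1]
      · by_cases h2 : b < a
        · rw [if_neg h1, if_pos h2] at h; exact Bool.noConfusion h
        · rw [if_neg h1, if_neg h2] at h
          rw [if_neg h2, if_neg h1]
          exact ih bs h

theorem pvPathLt_append : ∀ (p q : List String) (a b : String), p.length = q.length →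
    pvPathLt p q = true → pvPathLt (p ++ [a]) (q ++ [b]) = true := by
  intro p
  induction p with
  | nil =>
    intro q a b hl h
    cases q with
    | nil => simp [pvPathLt] at h
    | cons y ys => simp at hl
  | cons x xs ih =>
    intro q a b hl h
    cases q with
    | nil => simp at hl
    | cons y ys =>
      simp only [List.cons_append, pvPathLt] at h ⊢
      by_cases h1 : x < y
      · rw [if_pos h1]
      · by_cases h2 : y < x
        · rw [if_neg h1, if_pos h2] at h; exact Bool.noConfusion h
        · rw [if_neg h1, if_neg h2] at h
          rw [if_neg h1, if_neg h2]
          exact ih ys a b (by simpa using hl) h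

theorem pvPathLt_append_lt : ∀ (p : List String) (a b : String), a < b →
    pvPathLt (p ++ [a]) (p ++ [b]) = true := by
  intro p
  induction p with
  | nil =>
    intro a b h
    show pvPathLt ([a]) ([b]) = true
    simp only [pvPathLt]
    rw [if_pos h]
  | cons x xs ih =>
    intro a b h
    simp only [List.cons_append, pvPathLt]
    rw [if_neg (lt_irrefl x), if_neg (lt_irrefl x)]
    exact ih a b h

theorem pvHpush_eq_append : ∀ (pq : List (Int × List String)) (e : Int × List String),
    (∀ x ∈ pq, pvEntryLt e x = false) → pvHpush pq e = pq ++ [e] := by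
  intro pq
  induction pq with
  | nil => intro e _; rfl
  | cons x rest ih =>
    intro e h
    simp only [pvHpush]
    rw [if_neg (by simp [h x List.mem_cons_self])]
    rw [ih e (fun y hy => h y (List.mem_cons_of_mem _ hy))]
    simp

theorem pvEntryLt_level (c : Int) (s r : List String) : pvEntryLt (c + 1, s) (c, r) = false := by
  simp only [pvEntryLt, Bool.or_eq_false_iff, Bool.and_eq_false_iff, decide_eq_false_iff_not]
  constructor
  · omega
  · left; omega

theorem pvEntryLt_path (c : Int) (s r : List String) (h : pvPathLt r s = true) :
    pvEntryLt (c + 1, s) (c + 1, r) = false := by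
  simp only [pvEntryLt, Bool.or_eq_false_iff, Bool.and_eq_false_iff, decide_eq_false_iff_not]
  constructor
  · omega
  · right; exact pvPathLt_asymm r s h

-- sorted(s) for a duplicate-free list of strings is strictly increasing
theorem pvSortedStrict (ns : List String) (h : ns.Nodup) :
    (PySem.List.sorted ns (fun x => x) false).Pairwise (fun a b => a < b) := by
  have h1 := PySem.List.sorted_pairwise (xs := ns) (key := fun x : String => x)
  have h2 : (PySem.List.sorted ns (fun x => x) false).Nodup :=
    (PySem.List.sorted_perm ns (fun x : String => x) false).symm.nodup h
  exact (h1.and h2).imp (fun h => lt_of_le_of_ne h.1 h.2)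

theorem pvOrderedGraph_pairwise (graph : List (String × List String))
    (hpre : ∀ p ∈ graph, p.2.Nodup) :
    ∀ cur, ((pvOrderedGraph graph).getD cur []).Pairwise (fun a b => a < b) := by
  unfold pvOrderedGraph
  suffices h : ∀ (l : List (String × List String)) (d : PySem.Dict String (List String)),
      (∀ p ∈ l, p.2.Nodup) →
      (∀ cur, (d.getD cur []).Pairwise (fun a b : String => a < b)) →
      ∀ cur, ((l.foldl (fun d p => d.insert p.1 (PySem.List.sorted p.2 (fun x => x) false)) d).getD cur []).Pairwise (fun a b => a < b) by
    refine h graph PySem.Dict.empty hpre (fun cur => ?_)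
    simp [PySem.Dict.getD, PySem.Dict.get?, PySem.Dict.empty]
  intro l
  induction l with
  | nil => intro d _ hd cur; simpa using hd cur
  | cons p rest ih =>
    intro d hl hd cur
    simp only [List.foldl_cons]
    refine ih _ (fun q hq => hl q (List.mem_cons_of_mem _ hq)) (fun cur' => ?_) cur
    rw [PySem.Dict.getD_insert]
    split_ifs with hcc
    · exact pvSortedStrict p.2 (hl p List.mem_cons_self)
    · exact hd cur'

-- one-step equations for pvLevel
theorem pvLevel_nil (dest : String) (k maxc maxe : Int) (adj : PySem.Dict String (List String))
    (c : Int) (nxt found : List (List String)) (exp : Int) :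
    pvLevel dest k maxc maxe adj c [] nxt found exp = (found, nxt, exp, false) := rfl

theorem pvLevel_break (dest : String) (k maxc maxe : Int) (adj : PySem.Dict String (List String))
    (c : Int) (path : List String) (rest nxt found : List (List String)) (exp : Int)
    (hk : k ≤ (found.length : Int)) :
    pvLevel dest k maxc maxe adj c (path :: rest) nxt found exp = (found, nxt, exp, false) := by
  simp only [pvLevel, if_pos hk]

theorem pvLevel_dest (dest : String) (k maxc maxe : Int) (adj : PySem.Dict String (List String))
    (c : Int) (path : List String) (rest nxt found : List (List String)) (exp : Int)
    (hk : ¬ k ≤ (found.length : Int))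
    (hd : ((PySem.List.pyGet? path (-1)).getD "" == dest) = true) :
    pvLevel dest k maxc maxe adj c (path :: rest) nxt found exp
      = pvLevel dest k maxc maxe adj c rest nxt (found ++ [path]) exp := by
  simp only [pvLevel]; rw [if_neg hk, if_pos hd]

theorem pvLevel_skip (dest : String) (k maxc maxe : Int) (adj : PySem.Dict String (List String))
    (c : Int) (path : List String) (rest nxt found : List (List String)) (exp : Int)
    (hk : ¬ k ≤ (found.length : Int))
    (hd : ¬ ((PySem.List.pyGet? path (-1)).getD "" == dest) = true) (hc : ¬ c < maxc) :
    pvLevel dest k maxc maxe adj c (path :: rest) nxt found exp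
      = pvLevel dest k maxc maxe adj c rest nxt found exp := by
  simp only [pvLevel]; rw [if_neg hk, if_neg hd, if_neg hc]

theorem pvLevel_expand (dest : String) (k maxc maxe : Int) (adj : PySem.Dict String (List String))
    (c : Int) (path : List String) (rest nxt found : List (List String)) (exp : Int)
    (hk : ¬ k ≤ (found.length : Int))
    (hd : ¬ ((PySem.List.pyGet? path (-1)).getD "" == dest) = true) (hc : c < maxc) :
    pvLevel dest k maxc maxe adj c (path :: rest) nxt found exp
      = (if (pvExpandB path maxe (adj.getD ((PySem.List.pyGet? path (-1)).getD "") []) nxt exp).2.2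
         then (found,
           (pvExpandB path maxe (adj.getD ((PySem.List.pyGet? path (-1)).getD "") []) nxt exp).1,
           (pvExpandB path maxe (adj.getD ((PySem.List.pyGet? path (-1)).getD "") []) nxt exp).2.1, true)
         else pvLevel dest k maxc maxe adj c rest
           (pvExpandB path maxe (adj.getD ((PySem.List.pyGet? path (-1)).getD "") []) nxt exp).1 found
           (pvExpandB path maxe (adj.getD ((PySem.List.pyGet? path (-1)).getD "") []) nxt exp).2.1) := by
  simp only [pvLevel]; rw [if_neg hk, if_neg hd, if_pos hc]

-- one-step unfold lemmas for the two fuelled loops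
theorem pvLoopA_nil (dest : String) (k maxc maxe : Int) (adj : PySem.Dict String (List String))
    (fuel : Nat) (found : List (List String)) (exp : Int) :
    pvLoopA dest k maxc maxe adj (fuel + 1) [] found exp = (found, exp, false) := rfl

theorem pvLoopA_cons_notk (dest : String) (k maxc maxe : Int) (adj : PySem.Dict String (List String))
    (fuel : Nat) (c : Int) (path : List String) (rest : List (Int × List String))
    (found : List (List String)) (exp : Int) (hk : ¬ (found.length : Int) < k) :
    pvLoopA dest k maxc maxe adj (fuel + 1) ((c, path) :: rest) found exp = (found, exp, false) := by
  simp only [pvLoopA]; rw [if_neg hk]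

theorem pvLoopA_cons_dest (dest : String) (k maxc maxe : Int) (adj : PySem.Dict String (List String))
    (fuel : Nat) (c : Int) (path : List String) (rest : List (Int × List String))
    (found : List (List String)) (exp : Int) (hk : (found.length : Int) < k)
    (hd : ((PySem.List.pyGet? path (-1)).getD "" == dest) = true) :
    pvLoopA dest k maxc maxe adj (fuel + 1) ((c, path) :: rest) found exp
      = pvLoopA dest k maxc maxe adj fuel rest (found ++ [path]) exp := by
  simp only [pvLoopA]; rw [if_pos hk, if_pos hd]

theorem pvLoopA_cons_skip (dest : String) (k maxc maxe : Int) (adj : PySem.Dict String (List String))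
    (fuel : Nat) (c : Int) (path : List String) (rest : List (Int × List String))
    (found : List (List String)) (exp : Int) (hk : (found.length : Int) < k)
    (hd : ¬ ((PySem.List.pyGet? path (-1)).getD "" == dest) = true) (hc : maxc ≤ c) :
    pvLoopA dest k maxc maxe adj (fuel + 1) ((c, path) :: rest) found exp
      = pvLoopA dest k maxc maxe adj fuel rest found exp := by
  simp only [pvLoopA]; rw [if_pos hk, if_neg hd, if_pos hc]

theorem pvLoopA_cons_expand (dest : String) (k maxc maxe : Int) (adj : PySem.Dict String (List String))
    (fuel : Nat) (c : Int) (path : List String) (rest : List (Int × List String))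
    (found : List (List String)) (exp : Int) (hk : (found.length : Int) < k)
    (hd : ¬ ((PySem.List.pyGet? path (-1)).getD "" == dest) = true) (hc : ¬ maxc ≤ c) :
    pvLoopA dest k maxc maxe adj (fuel + 1) ((c, path) :: rest) found exp
      = (if (pvExpandA c path maxe (adj.getD ((PySem.List.pyGet? path (-1)).getD "") []) rest exp).2.2
         then (found, (pvExpandA c path maxe (adj.getD ((PySem.List.pyGet? path (-1)).getD "") []) rest exp).2.1, true)
         else pvLoopA dest k maxc maxe adj fuel
            (pvExpandA c path maxe (adj.getD ((PySem.List.pyGet? path (-1)).getD "") []) rest exp).1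
            found
            (pvExpandA c path maxe (adj.getD ((PySem.List.pyGet? path (-1)).getD "") []) rest exp).2.1) := by
  simp only [pvLoopA]; rw [if_pos hk, if_neg hd, if_neg hc]

-- what pvLoopB does after one level: helper naming the continuation
def pvAfterLevel (dest : String) (k maxc maxe : Int) (adj : PySem.Dict String (List String))
    (fb : Nat) (c : Int) (r : List (List String) × List (List String) × Int × Bool) :
    List (List String) × Int × Bool :=
  if r.2.2.2 then (r.1, r.2.2.1, true)
  else pvLoopB dest k maxc maxe adj fb (c + 1) r.2.1 r.1 r.2.2.1

theorem pvAfterLevel_ret (dest : String) (k maxc maxe : Int) (adj : PySem.Dict String (List String))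
    (fb : Nat) (c : Int) (found nxt : List (List String)) (exp : Int) :
    pvAfterLevel dest k maxc maxe adj fb c (found, nxt, exp, false)
      = pvLoopB dest k maxc maxe adj fb (c + 1) nxt found exp := by
  simp [pvAfterLevel]

theorem pvAfterLevel_true (dest : String) (k maxc maxe : Int) (adj : PySem.Dict String (List String))
    (fb : Nat) (c : Int) (found nxt : List (List String)) (exp : Int) :
    pvAfterLevel dest k maxc maxe adj fb c (found, nxt, exp, true) = (found, exp, true) := by
  simp [pvAfterLevel]

theorem pvLoopB_nil (dest : String) (k maxc maxe : Int) (adj : PySem.Dict String (List String))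
    (fuel : Nat) (c : Int) (found : List (List String)) (exp : Int) :
    pvLoopB dest k maxc maxe adj (fuel + 1) c [] found exp = (found, exp, false) := rfl

theorem pvLoopB_cons_notk (dest : String) (k maxc maxe : Int) (adj : PySem.Dict String (List String))
    (fuel : Nat) (c : Int) (f : List String) (fs : List (List String)) (found : List (List String))
    (exp : Int) (hk : ¬ (found.length : Int) < k) :
    pvLoopB dest k maxc maxe adj (fuel + 1) c (f :: fs) found exp = (found, exp, false) := by
  simp only [pvLoopB]; rw [if_neg hk]

theorem pvLoopB_cons (dest : String) (k maxc maxe : Int) (adj : PySem.Dict String (List String))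
    (fuel : Nat) (c : Int) (f : List String) (fs : List (List String)) (found : List (List String))
    (exp : Int) (hk : (found.length : Int) < k) :
    pvLoopB dest k maxc maxe adj (fuel + 1) c (f :: fs) found exp
      = pvAfterLevel dest k maxc maxe adj fuel c (pvLevel dest k maxc maxe adj c (f :: fs) [] found exp) := by
  simp only [pvLoopB, pvAfterLevel]; rw [if_pos hk]

-- A's expansion of one path inside the mixed queue equals B's expansion into the next
-- frontier, together with the facts the level induction needs about the new frontier.
theorem pv_expand (c : Int) (p : List String) (maxe : Int) :
    ∀ (nbrs : List String) (R kids : List (List String)) (exp : Int),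
      nbrs.Pairwise (fun a b => a < b) →
      (∀ q ∈ kids, ∀ a ∈ nbrs, pvPathLt q (p ++ [a]) = true) →
      kids.Pairwise (fun q r => pvPathLt q r = true) →
      pvExpandA c p maxe nbrs (R.map (fun x => (c, x)) ++ kids.map (fun x => (c + 1, x))) exp
        = (if (pvExpandB p maxe nbrs kids exp).2.2
           then []
           else R.map (fun x => (c, x)) ++ (pvExpandB p maxe nbrs kids exp).1.map (fun x => (c + 1, x)),
           (pvExpandB p maxe nbrs kids exp).2)
      ∧ (∀ q ∈ (pvExpandB p maxe nbrs kids exp).1, q ∈ kids ∨ ∃ nb ∈ nbrs, q = p ++ [nb])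
      ∧ (pvExpandB p maxe nbrs kids exp).1.Pairwise (fun q r => pvPathLt q r = true)
      ∧ ((pvExpandB p maxe nbrs kids exp).2.2 = false →
          (pvExpandB p maxe nbrs kids exp).1.length + (maxe + 1 - (pvExpandB p maxe nbrs kids exp).2.1).toNat
            ≤ kids.length + (maxe + 1 - exp).toNat
          ∧ exp ≤ (pvExpandB p maxe nbrs kids exp).2.1) := by
  intro nbrs
  induction nbrs with
  | nil =>
    intro R kids exp _ _ hkp
    refine ⟨by simp [pvExpandA, pvExpandB], ?_, hkp, ?_⟩
    · intro q hq; exact Or.inl hq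
    · intro _; exact ⟨le_refl _, le_refl _⟩
  | cons nb rest ih =>
    intro R kids exp hnb hN hkp
    by_cases hc : p.contains nb = true
    · simp only [pvExpandA, pvExpandB, hc, if_true, Bool.not_true, Bool.false_eq_true, if_false]
      rcases ih R kids exp hnb.of_cons (fun q hq a ha => hN q hq a (List.mem_cons_of_mem _ ha)) hkp
        with ⟨h1, h2, h3, h4⟩
      refine ⟨h1, ?_, h3, h4⟩
      intro q hq
      rcases h2 q hq with h | ⟨nb', hnb', he⟩
      · exact Or.inl h
      · exact Or.inr ⟨nb', List.mem_cons_of_mem _ hnb', he⟩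
    · have hc' : p.contains nb = false := by revert hc; cases p.contains nb <;> simp
      by_cases ht : maxe < exp + 1
      · simp only [pvExpandA, pvExpandB, hc', Bool.false_eq_true, if_false, Bool.not_false, if_true,
          if_pos ht]
        refine ⟨by simp, ?_, hkp, by intro h; exact Bool.noConfusion h⟩
        intro q hq; exact Or.inl hq
      · simp only [pvExpandA, pvExpandB, hc', Bool.false_eq_true, if_false, Bool.not_false, if_true,
          if_neg ht]
        have hpush : pvHpush (R.map (fun x => (c, x)) ++ kids.map (fun x => (c + 1, x))) (c + 1, p ++ [nb])
            = (R.map (fun x => (c, x)) ++ (kids ++ [p ++ [nb]]).map (fun x => (c + 1, x))) := by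
          rw [pvHpush_eq_append]
          · simp
          · intro x hx
            rcases List.mem_append.mp hx with hx | hx
            · rcases List.mem_map.mp hx with ⟨r, _, rfl⟩
              exact pvEntryLt_level c (p ++ [nb]) r
            · rcases List.mem_map.mp hx with ⟨q, hq, rfl⟩
              exact pvEntryLt_path c (p ++ [nb]) q (hN q hq nb List.mem_cons_self)
        rw [hpush]
        have hN' : ∀ q ∈ kids ++ [p ++ [nb]], ∀ a ∈ rest, pvPathLt q (p ++ [a]) = true := by
          intro q hq a ha
          rcases List.mem_append.mp hq with hq | hq
          · exact hN q hq a (List.mem_cons_of_mem _ ha)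
          · rcases List.mem_singleton.mp hq with rfl
            exact pvPathLt_append_lt p nb a ((List.pairwise_cons.mp hnb).1 a ha)
        have hkp' : (kids ++ [p ++ [nb]]).Pairwise (fun q r => pvPathLt q r = true) := by
          refine List.pairwise_append.mpr ⟨hkp, List.pairwise_singleton _ _, ?_⟩
          intro q hq r hr
          rcases List.mem_singleton.mp hr with rfl
          exact hN q hq nb List.mem_cons_self
        rcases ih R (kids ++ [p ++ [nb]]) (exp + 1) hnb.of_cons hN' hkp' with ⟨h1, h2, h3, h4⟩
        refine ⟨h1, ?_, h3, ?_⟩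
        · intro q hq
          rcases h2 q hq with h | ⟨nb', hnb', he⟩
          · rcases List.mem_append.mp h with h | h
            · exact Or.inl h
            · rcases List.mem_singleton.mp h with rfl
              exact Or.inr ⟨nb, List.mem_cons_self, rfl⟩
          · exact Or.inr ⟨nb', List.mem_cons_of_mem _ hnb', he⟩
        · intro hf
          rcases h4 hf with ⟨ha, hb⟩
          simp only [List.length_append, List.length_singleton] at ha
          exact ⟨by omega, by omega⟩

-- the core correspondence: A's mixed queue of the remaining level-c paths followed by the
-- already generated level-(c+1) children behaves like B's level processing; fa/fb are
-- fuel reserves, bounded below by the loop measure so that neither loop runs dry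
theorem pv_main (dest : String) (k maxc maxe : Int) (adj : PySem.Dict String (List String))
    (hadj : ∀ cur : String, (adj.getD cur []).Pairwise (fun a b => a < b)) :
    ∀ (m fa fb : Nat) (c : Int) (n : Nat) (rem kids found : List (List String)) (exp : Int),
      2 * (maxe + 1 - exp).toNat + rem.length + 2 * kids.length ≤ m →
      2 * (maxe + 1 - exp).toNat + rem.length + 2 * kids.length < fa →
      2 * (maxe + 1 - exp).toNat + rem.length + 2 * kids.length + 2 ≤ fb →
      (∀ p ∈ rem, p.length = n + 1) →
      (∀ q ∈ kids, q.length = n + 2) →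
      rem.Pairwise (fun p q => pvPathLt p q = true) →
      kids.Pairwise (fun p q => pvPathLt p q = true) →
      (∀ p ∈ rem, ∀ q ∈ kids, ∀ a, pvPathLt q (p ++ [a]) = true) →
      pvLoopA dest k maxc maxe adj fa
          (rem.map (fun x => (c, x)) ++ kids.map (fun x => (c + 1, x))) found exp
        = pvAfterLevel dest k maxc maxe adj fb c (pvLevel dest k maxc maxe adj c rem kids found exp) := by
  intro m
  induction m with
  | zero =>
    intro fa fb c n rem kids found exp hm hfa hfb _ _ _ _ _
    have hrem : rem = [] := List.eq_nil_of_length_eq_zero (by omega)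
    have hkids : kids = [] := List.eq_nil_of_length_eq_zero (by omega)
    subst hrem; subst hkids
    obtain ⟨fa', rfl⟩ : ∃ x, fa = x + 1 := ⟨fa - 1, by omega⟩
    obtain ⟨g, rfl⟩ : ∃ x, fb = x + 1 := ⟨fb - 1, by omega⟩
    simp only [List.map_nil, List.nil_append]
    rw [pvLoopA_nil, pvLevel_nil, pvAfterLevel_ret, pvLoopB_nil]
  | succ m ih =>
    intro fa fb c n rem kids found exp hm hfa hfb hrlen hklen hrp hkp hcross
    obtain ⟨fa', rfl⟩ : ∃ x, fa = x + 1 := ⟨fa - 1, by omega⟩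
    obtain ⟨g, rfl⟩ : ∃ x, fb = x + 1 := ⟨fb - 1, by omega⟩
    cases rem with
    | nil =>
      cases kids with
      | nil =>
        simp only [List.map_nil, List.nil_append]
        rw [pvLoopA_nil, pvLevel_nil, pvAfterLevel_ret, pvLoopB_nil]
      | cons q K =>
        have hstep := ih (fa' + 1) g (c + 1) (n + 1) (q :: K) [] found exp
          (by simp only [List.length_cons, List.length_nil] at hm ⊢; omega)
          (by simp only [List.length_cons, List.length_nil] at hfa ⊢; omega)
          (by simp only [List.length_cons, List.length_nil] at hfb ⊢; omega)
          hklen (by intro x hx; cases hx) hkp (by constructor) (by intro _ _ x hx; cases hx)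
        have hL : (([] : List (List String)).map (fun x => (c, x))
              ++ (q :: K).map (fun x => (c + 1, x)))
            = ((q :: K).map (fun x => (c + 1, x))
              ++ ([] : List (List String)).map (fun x => (c + 1 + 1, x))) := by simp
        rw [hL, hstep]
        rw [pvLevel_nil dest k maxc maxe adj c (q :: K) found exp]
        rw [pvAfterLevel_ret]
        by_cases hk : (found.length : Int) < k
        · rw [pvLoopB_cons dest k maxc maxe adj g (c + 1) q K found exp hk]
        · rw [pvLoopB_cons_notk dest k maxc maxe adj g (c + 1) q K found exp hk]
          rw [pvLevel_break dest k maxc maxe adj (c + 1) q K [] found exp (not_lt.mp hk)]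
          rw [pvAfterLevel_ret]
          obtain ⟨g2, rfl⟩ : ∃ x, g = x + 1 :=
            ⟨g - 1, by simp only [List.length_cons, List.length_nil] at hfb; omega⟩
          rw [pvLoopB_nil]
    | cons p R =>
      by_cases hk : (found.length : Int) < k
      · by_cases hd : ((PySem.List.pyGet? p (-1)).getD "" == dest) = true
        · -- destination reached: append to found, continue
          simp only [List.map_cons, List.cons_append]
          rw [pvLoopA_cons_dest dest k maxc maxe adj fa' c p
              (R.map (fun x => (c, x)) ++ kids.map (fun x => (c + 1, x))) found exp hk hd]
          rw [ih fa' (g + 1) c n R kids (found ++ [p]) exp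
            (by simp only [List.length_cons] at hm; omega)
            (by simp only [List.length_cons] at hfa; omega)
            (by simp only [List.length_cons] at hfb; omega)
            (fun x hx => hrlen x (List.mem_cons_of_mem _ hx)) hklen hrp.of_cons hkp
            (fun x hx => hcross x (List.mem_cons_of_mem _ hx))]
          rw [pvLevel_dest dest k maxc maxe adj c p R kids found exp (not_le.mpr hk) hd]
        · by_cases hc : maxc ≤ c
          · -- connections exhausted: drop the path
            simp only [List.map_cons, List.cons_append]
            rw [pvLoopA_cons_skip dest k maxc maxe adj fa' c p
                (R.map (fun x => (c, x)) ++ kids.map (fun x => (c + 1, x))) found exp hk hd hc]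
            rw [ih fa' (g + 1) c n R kids found exp
              (by simp only [List.length_cons] at hm; omega)
              (by simp only [List.length_cons] at hfa; omega)
              (by simp only [List.length_cons] at hfb; omega)
              (fun x hx => hrlen x (List.mem_cons_of_mem _ hx)) hklen hrp.of_cons hkp
              (fun x hx => hcross x (List.mem_cons_of_mem _ hx))]
            rw [pvLevel_skip dest k maxc maxe adj c p R kids found exp (not_le.mpr hk) hd
              (not_lt.mpr hc)]
          · -- expand the path
            simp only [List.map_cons, List.cons_append]
            rw [pvLoopA_cons_expand dest k maxc maxe adj fa' c p
                (R.map (fun x => (c, x)) ++ kids.map (fun x => (c + 1, x))) found exp hk hd hc]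
            rcases pv_expand c p maxe (adj.getD ((PySem.List.pyGet? p (-1)).getD "") []) R kids exp
              (hadj _)
              (fun q hq a _ => hcross p List.mem_cons_self q hq a)
              hkp with ⟨h1, h2, h3, h4⟩
            rw [h1]
            rw [pvLevel_expand dest k maxc maxe adj c p R kids found exp (not_le.mpr hk) hd
              (not_le.mp hc)]
            by_cases htr :
                (pvExpandB p maxe (adj.getD ((PySem.List.pyGet? p (-1)).getD "") []) kids exp).2.2 = true
            · rw [if_pos htr, if_pos htr, if_pos htr]
              rw [pvAfterLevel_true]
            · rw [if_neg htr, if_neg htr, if_neg htr]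
              rcases h4 (by simpa using htr) with ⟨hma, hmb⟩
              rw [ih fa' (g + 1) c n R
                (pvExpandB p maxe (adj.getD ((PySem.List.pyGet? p (-1)).getD "") []) kids exp).1
                found
                (pvExpandB p maxe (adj.getD ((PySem.List.pyGet? p (-1)).getD "") []) kids exp).2.1
                (by simp only [List.length_cons] at hm; omega)
                (by simp only [List.length_cons] at hfa; omega)
                (by simp only [List.length_cons] at hfb; omega)
                (fun x hx => hrlen x (List.mem_cons_of_mem _ hx))
                (by
                  intro q hq
                  rcases h2 q hq with h | ⟨nb, _, rfl⟩
                  · exact hklen q h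
                  · have hp1 := hrlen p List.mem_cons_self
                    simp [List.length_append, hp1])
                hrp.of_cons h3
                (by
                  intro r hr q hq a
                  rcases h2 q hq with h | ⟨nb, _, rfl⟩
                  · exact hcross r (List.mem_cons_of_mem _ hr) q h a
                  · exact pvPathLt_append p r nb a
                      (by rw [hrlen p List.mem_cons_self, hrlen r (List.mem_cons_of_mem _ hr)])
                      ((List.pairwise_cons.mp hrp).1 r hr))]
      · -- k results already collected: everything stops
        simp only [List.map_cons, List.cons_append]
        rw [pvLoopA_cons_notk dest k maxc maxe adj fa' c p
            (R.map (fun x => (c, x)) ++ kids.map (fun x => (c + 1, x))) found exp hk]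
        rw [pvLevel_break dest k maxc maxe adj c p R kids found exp (not_lt.mp hk)]
        rw [pvAfterLevel_ret]
        cases kids with
        | nil => rw [pvLoopB_nil]
        | cons q K => rw [pvLoopB_cons_notk dest k maxc maxe adj g (c + 1) q K found exp hk]

-- ===== VERDICT (by name: the statement is the Claim_ definition above) =====
theorem find_top_k_by_connections_py_spec : Claim_equal_find_top_k_by_connections_py := by
  unfold Claim_equal_find_top_k_by_connections_py
  intro graph origin destination k maxc maxe hdom hpre
  unfold Spec_find_top_k_by_connections_py
  unfold find_top_k_by_connections_py find_top_k_by_connections_py_alt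
  by_cases ho : (origin == destination) = true
  · rw [if_pos ho, if_pos ho]
  · rw [if_neg ho, if_neg ho]
    have hadj := pvOrderedGraph_pairwise graph hpre
    have hmain := pv_main destination k maxc maxe (pvOrderedGraph graph) hadj
      (2 * (maxe + 1).toNat + 1) (2 * (maxe + 1).toNat + 2) (2 * (maxe + 1).toNat + 3)
      0 0 [[origin]] [] [] 0
      (by simp) (by simp) (by simp) (by intro x hx; simp at hx; simp [hx])
      (by intro x hx; cases hx)
      (List.pairwise_singleton _ _) (by constructor) (by intro _ _ x hx; cases hx)
    have hL : ([((0 : Int), [origin])])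
        = (([[origin]] : List (List String)).map (fun x => ((0 : Int), x))
          ++ ([] : List (List String)).map (fun x => ((0 : Int) + 1, x))) := by simp
    rw [hL, hmain]
    have hfb4 : 2 * (maxe + 1).toNat + 4 = (2 * (maxe + 1).toNat + 3) + 1 := by omega
    rw [hfb4]
    by_cases hk : ((([] : List (List String)).length : Int) < k)
    · rw [pvLoopB_cons destination k maxc maxe (pvOrderedGraph graph)
        (2 * (maxe + 1).toNat + 3) 0 [origin] [] [] 0 hk]
    · rw [pvLoopB_cons_notk destination k maxc maxe (pvOrderedGraph graph)
        (2 * (maxe + 1).toNat + 3) 0 [origin] [] [] 0 hk]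
      rw [pvLevel_break destination k maxc maxe (pvOrderedGraph graph) 0 [origin] [] [] [] 0
        (not_lt.mp hk)]
      rw [pvAfterLevel_ret]
      have hfb3 : 2 * (maxe + 1).toNat + 3 = (2 * (maxe + 1).toNat + 2) + 1 := by omega
      rw [hfb3, pvLoopB_nil]
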